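-- pv_equiv track=rewrite | github.com/SanjanaSunil/wikipedia-search-engine | search/Searcher.py | getDuplicateCount
-- ===== SOURCE A (Python) =====
-- def getDuplicateCount(query_tokens):
--     uniq_tokens = []
--     query_vector = []
--     for query_token in query_tokens:
--         flag = -1
--         for j, uniq_token in enumerate(uniq_tokens):
--             if query_token == uniq_token:
--                 flag = j
--                 break
--         if flag == -1:
--             uniq_tokens.append(query_token)
--             query_vector.append(1)
--         else:
--             query_vector[j] += 1
--     return uniq_tokens, query_vector
-- ===== SOURCE B (Python) =====
-- def getDuplicateCount(query_tokens):
--     # Declarative, stateless formulation: a token is "distinct" iff it does not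
--     # occur in the prefix before its position; its count is a full-list scan.
--     uniq_tokens = [t for i, t in enumerate(query_tokens)
--                    if t not in query_tokens[:i]]
--     query_vector = [query_tokens.count(t) for t in uniq_tokens]
--     return uniq_tokens, query_vector
-- ===== Notes on version B (the rewrite author's own statement) =====
-- stated objective: simpler
-- what changed: Replaces A's stateful interleaved loop (growing uniq_tokens, searching it, incrementing a vector slot in place) by a stateless declarative formulation: a comprehension keeping each token whose prefix query_tokens[:i] does not already contain it, and a second comprehension mapping each distinct token to query_tokens.count(t); no mutable accumulator, no in-place increment, no inner search of the accumulator.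
import Mathlib
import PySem

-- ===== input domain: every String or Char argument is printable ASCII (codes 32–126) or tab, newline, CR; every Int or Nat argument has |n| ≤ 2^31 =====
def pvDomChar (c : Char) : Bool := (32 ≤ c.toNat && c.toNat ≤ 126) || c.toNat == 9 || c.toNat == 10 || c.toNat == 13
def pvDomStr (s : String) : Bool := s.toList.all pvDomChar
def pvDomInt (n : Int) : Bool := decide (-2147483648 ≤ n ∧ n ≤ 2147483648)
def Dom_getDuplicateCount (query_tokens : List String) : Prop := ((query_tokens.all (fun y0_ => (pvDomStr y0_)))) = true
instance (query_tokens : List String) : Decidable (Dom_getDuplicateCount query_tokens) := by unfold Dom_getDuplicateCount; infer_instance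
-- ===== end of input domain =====

-- ===== PORT A =====
-- B replaces A's stateful loop (grow uniq_tokens, inner search, in-place increment) by a stateless
-- declarative formulation: keep tokens absent from their preceding prefix, count by full-list scans (simpler).

-- inner loop of A: 'for j, uniq_token in enumerate(uniq_tokens): if query_token == uniq_token: flag = j; break'
-- returns the final flag (j on the first match, else -1)
def pvFindFlag (uniq_tokens : List String) (query_token : String) (j : Nat) : Int :=
  match uniq_tokens with
  | [] => -1
  | u :: rest => if query_token == u then (j : Int) else pvFindFlag rest query_token (j + 1)

def getDuplicateCount (query_tokens : List String) : List String × List Int :=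
  query_tokens.foldl
    (fun s query_token =>
      let flag := pvFindFlag s.1 query_token 0
      if flag = -1 then
        (s.1 ++ [query_token], s.2 ++ [1])
      else
        -- query_vector[j] += 1 ; here flag = j with 0 ≤ j < len(query_vector), so getD/set is exact
        (s.1, s.2.set flag.toNat (s.2.getD flag.toNat 0 + 1)))
    ([], [])

-- ===== PORT B =====
def getDuplicateCount_alt (query_tokens : List String) : List String × List Int :=
  -- uniq_tokens = [t for i, t in enumerate(query_tokens) if t not in query_tokens[:i]]
  let uniq_tokens :=
    ((PySem.List.enumerate query_tokens 0).filter
      (fun p => !(PySem.List.slice query_tokens none (some p.1)).contains p.2)).map (·.2)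
  -- query_vector = [query_tokens.count(t) for t in uniq_tokens]
  let query_vector := uniq_tokens.map (fun t => (PySem.List.count query_tokens t : Int))
  (uniq_tokens, query_vector)

-- ===== PRECONDITION & SPEC =====
def Spec_getDuplicateCount (query_tokens : List String) (out : List String × List Int) : Prop := out = getDuplicateCount_alt query_tokens
instance (query_tokens : List String) (out : List String × List Int) : Decidable (Spec_getDuplicateCount query_tokens out) := by unfold Spec_getDuplicateCount; infer_instance

-- ===== CLAIM (what is proved, stated in full; the proofs are below) =====
def Claim_equal_getDuplicateCount : Prop := ∀ (query_tokens : List String), Dom_getDuplicateCount query_tokens → Spec_getDuplicateCount query_tokens (getDuplicateCount query_tokens)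

-- ===== LEMMAS AND PROOFS =====

-- B's uniq comprehension picks out exactly the first occurrences, in order
lemma uniq_eq (l : List String) :
    (((PySem.List.enumerate l 0).filter
        (fun p => !(PySem.List.slice l none (some p.1)).contains p.2)).map (·.2))
      = PySem.Set.ofList l := by
  induction l using List.reverseRecOn with
  | nil => rfl
  | append_singleton l q ih =>
    rw [PySem.List.enumerate_append, List.filter_append, List.map_append,
      PySem.Set.ofList_append_singleton]
    have hpre : (PySem.List.enumerate l 0).filter
        (fun p => !(PySem.List.slice (l ++ [q]) none (some p.1)).contains p.2)
        = (PySem.List.enumerate l 0).filter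
        (fun p => !(PySem.List.slice l none (some p.1)).contains p.2) := by
      apply List.filter_congr
      intro p hp
      rcases (PySem.List.mem_enumerate_iff _ _ _).mp hp with ⟨k, hk, rfl⟩
      simp only [zero_add, PySem.List.slice_to_natCast,
        List.take_append_of_le_length (le_of_lt hk)]
    rw [hpre, ih]
    have hlast : PySem.List.enumerate [q] (0 + (l.length : Int)) = [((l.length : Int), q)] := by
      simp [PySem.List.enumerate_cons, PySem.List.enumerate_nil]
    rw [hlast]
    have hslice : PySem.List.slice (l ++ [q]) none (some ((l.length : Nat) : Int)) = l := by
      rw [PySem.List.slice_to_natCast, List.take_append_of_le_length (le_refl _), List.take_length]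
    by_cases hm : q ∈ l
    · rw [PySem.Set.add_of_mem ((PySem.Set.mem_ofList _ _).mpr hm)]
      simp [hslice, hm]
    · rw [PySem.Set.add_of_not_mem (fun hc => hm ((PySem.Set.mem_ofList _ _).mp hc))]
      simp [hslice, hm]

-- B's result in canonical form
lemma alt_eq (l : List String) :
    getDuplicateCount_alt l =
      (PySem.List.dedup l, (PySem.List.dedup l).map (fun t => (l.count t : Int))) := by
  unfold getDuplicateCount_alt
  simp only [uniq_eq, PySem.List.dedup_eq_ofList, PySem.List.count_eq]

lemma findFlag_not_mem (u : List String) (q : String) (j : Nat) (h : q ∉ u) :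
    pvFindFlag u q j = -1 := by
  induction u generalizing j with
  | nil => rfl
  | cons a rest ih =>
    simp only [List.mem_cons, not_or] at h
    simp [pvFindFlag, h.1, ih j.succ h.2]

lemma findFlag_mem (u : List String) (q : String) (j : Nat) (h : q ∈ u) :
    pvFindFlag u q j = (j : Int) + (List.idxOf q u : Int) := by
  induction u generalizing j with
  | nil => simp at h
  | cons a rest ih =>
    by_cases hq : q = a
    · simp [pvFindFlag, hq, List.idxOf_cons_self]
    · have hm : q ∈ rest := by
        rcases List.mem_cons.mp h with h1 | h1
        · exact absurd h1 hq
        · exact h1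
      simp only [pvFindFlag, if_neg (by simp [hq] : ¬ (q == a) = true)]
      rw [ih (j + 1) hm, List.idxOf_cons_ne _ (fun hc => hq hc.symm)]
      push_cast
      ring

lemma main_invariant (l : List String) :
    getDuplicateCount l =
      (PySem.List.dedup l, (PySem.List.dedup l).map (fun t => (l.count t : Int))) := by
  unfold getDuplicateCount
  induction l using List.reverseRecOn with
  | nil => rfl
  | append_singleton l q ih =>
    rw [List.foldl_append, ih]
    simp only [List.foldl_cons, List.foldl_nil, PySem.List.dedup_eq_ofList,
      PySem.Set.ofList_append_singleton]
    by_cases hm : q ∈ l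
    · -- q seen before: flag = idxOf, increment at that slot
      have hmem : q ∈ PySem.Set.ofList l := (PySem.Set.mem_ofList _ _).mpr hm
      rw [PySem.Set.add_of_mem hmem]
      set u := PySem.Set.ofList l with hu
      have hnd : u.Nodup := PySem.Set.nodup_ofList l
      set j := List.idxOf q u with hj
      have hjlt : j < u.length := List.idxOf_lt_length_of_mem hmem
      have hflag : pvFindFlag u q 0 = (j : Int) := by
        rw [findFlag_mem u q 0 hmem]; push_cast; ring
      simp only [hflag]
      rw [if_neg (by omega : ¬ ((j : Int) = -1))]
      refine Prod.ext rfl ?_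
      simp only [Int.toNat_natCast]
      have hgu : u[j]'hjlt = q := List.getElem_idxOf hjlt
      apply List.ext_getElem
      · simp
      · intro i h1 h2
        have hil : i < u.length := by simpa using h2
        rw [List.getElem_set (by simpa using h1)]
        by_cases hij : j = i
        · rw [if_pos hij]
          have hgetD : (u.map (fun t => (l.count t : Int))).getD j 0 = (l.count q : Int) := by
            rw [List.getD_eq_getElem _ _ (by simpa using hjlt)]
            simp [hgu]
          rw [hgetD]
          simp only [List.getElem_map]
          have hgi : u[i]'hil = q := by subst hij; exact hgu
          rw [hgi, List.count_append]
          simp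
        · rw [if_neg hij]
          simp only [List.getElem_map]
          have hne : u[i]'hil ≠ q := by
            intro hc
            apply hij
            have := hnd.idxOf_getElem i hil
            rw [hc] at this
            omega
          rw [List.count_append]
          simp [List.count_eq_zero, hne]
    · -- new token: append
      have hnmem : q ∉ PySem.Set.ofList l := fun hc => hm ((PySem.Set.mem_ofList _ _).mp hc)
      rw [PySem.Set.add_of_not_mem hnmem]
      have hflag : pvFindFlag (PySem.Set.ofList l) q 0 = -1 :=
        findFlag_not_mem _ _ _ hnmem
      simp only [hflag, if_true]
      have hmapeq : (PySem.Set.ofList l).map (fun t => (l.count t : Int))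
          = (PySem.Set.ofList l).map (fun t => ((l ++ [q]).count t : Int)) := by
        apply List.map_congr_left
        intro t ht
        have htq : t ≠ q := fun hc => hnmem (hc ▸ ht)
        rw [List.count_append]
        simp [List.count_eq_zero, htq]
      refine Prod.ext rfl ?_
      rw [List.map_append, ← hmapeq]
      congr 1
      simp [List.count_append, List.count_eq_zero_of_not_mem hm]

-- ===== VERDICT (by name: the statement is the Claim_ definition above) =====
theorem getDuplicateCount_spec : Claim_equal_getDuplicateCount := by
  intro l _
  unfold Spec_getDuplicateCount
  rw [main_invariant, alt_eq]
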